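-- pv_equiv track=rewrite | github.com/xpessoles/Informatique | Exercices/03_tableaux/pyramide/d01s-cor-ms.py | compte
-- ===== SOURCE A (Python) =====
-- def compte(alpha,n):
--     """Compte le nombre de u(k) <= 10000 pour 0<= k < n"""
--     x = alpha
--     c = 0
--     for k in range(n):
--         # Invariant : x = u(k)
--         if x <= 10000:
--             c = c+1
--         x = (15091 * x) % 64007
--     return c
-- ===== SOURCE B (Python) =====
-- def compte(alpha, n):
--     """Compte le nombre de u(k) <= 10000 pour 0<= k < n"""
--     # Brent-style cycle detection, counting as the hare walks:
--     # y = u(t) (power-of-two anchor), ct = count before index t;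
--     # x = u(h), c = count before index h.
--     x = alpha
--     c = 0
--     h = 0
--     y = alpha
--     t = 0
--     ct = 0
--     power = 1
--     while h < n:
--         if x <= 10000:
--             c += 1
--         x = (15091 * x) % 64007
--         h += 1
--         if h - t == power:
--             y = x
--             t = h
--             ct = c
--             power *= 2
--         elif x == y:
--             # u(t) == u(h): period p = h - t from index t on
--             p = h - t
--             q, r = divmod(n - t, p)
--             cc = ct + q * (c - ct)
--             for _ in range(r):
--                 if y <= 10000:
--                     cc += 1
--                 y = (15091 * y) % 64007
--             return cc
--     return c
-- ===== Notes on version B (the rewrite author's own statement) =====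
-- stated objective: faster
-- what changed: B replaces A's step-by-step loop over all n iterations with Brent-style cycle detection (power-of-two anchor, no extra memory): once u(t)=u(h) is found it combines the prefix count, whole-cycle counts via divmod, and a short partial-cycle scan.
import Mathlib
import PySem

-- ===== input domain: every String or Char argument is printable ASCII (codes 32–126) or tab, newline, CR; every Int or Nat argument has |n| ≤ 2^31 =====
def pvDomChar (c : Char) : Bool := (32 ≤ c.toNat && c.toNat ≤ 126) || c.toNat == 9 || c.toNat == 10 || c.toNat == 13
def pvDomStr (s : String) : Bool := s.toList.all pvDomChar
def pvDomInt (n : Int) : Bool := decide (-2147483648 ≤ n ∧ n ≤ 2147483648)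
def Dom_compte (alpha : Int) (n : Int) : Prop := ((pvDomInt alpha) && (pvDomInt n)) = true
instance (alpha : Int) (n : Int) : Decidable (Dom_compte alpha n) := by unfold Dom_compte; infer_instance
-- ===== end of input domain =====

-- B: Brent-style cycle detection instead of A's O(n) step loop; return values proved equal for all inputs.

-- ===== PORT A =====
def compte (alpha : Int) (n : Int) : Int :=
  ((PySem.List.pyRange 0 n 1).foldl
    (fun (s : Int × Int) _ =>
      (PySem.Int.mod (15091 * s.1) 64007, if s.1 ≤ 10000 then s.2 + 1 else s.2))
    (alpha, 0)).2

-- ===== PORT B =====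
-- inner `for _ in range(r)` loop of Source B: count r further terms starting at x
def compteAltInner : Nat → Int → Int → Int
  | 0, _, cc => cc
  | r + 1, x, cc =>
      compteAltInner r (PySem.Int.mod (15091 * x) 64007) (if x ≤ 10000 then cc + 1 else cc)

-- outer `while h < n` loop of Source B (Brent-style anchor y = u(t), counts c, ct)
def compteAltLoop (n x c h y t ct power : Int) : Int :=
  if _hlt : h < n then
    let c' := if x ≤ 10000 then c + 1 else c
    let x' := PySem.Int.mod (15091 * x) 64007
    let h' := h + 1
    if h' - t = power then
      compteAltLoop n x' c' h' x' h' c' (power * 2)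
    else if x' = y then
      let p := h' - t
      let q := PySem.Int.floordiv (n - t) p
      let r := PySem.Int.mod (n - t) p
      compteAltInner r.toNat y (ct + q * (c' - ct))
    else
      compteAltLoop n x' c' h' y t ct power
  else c
termination_by (n - h).toNat
decreasing_by all_goals omega

def compte_alt (alpha : Int) (n : Int) : Int :=
  compteAltLoop n alpha 0 0 alpha 0 0 1

-- ===== PRECONDITION & SPEC =====
def Spec_compte (alpha : Int) (n : Int) (out : Int) : Prop := out = compte_alt alpha n
instance (alpha : Int) (n : Int) (out : Int) : Decidable (Spec_compte alpha n out) := by unfold Spec_compte; infer_instance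

-- ===== CLAIM (what is proved, stated in full; the proofs are below) =====
def Claim_equal_compte : Prop := ∀ (alpha : Int) (n : Int), Dom_compte alpha n → Spec_compte alpha n (compte alpha n)

-- ===== LEMMAS AND PROOFS =====

-- the sequence u(k) and the prefix count c(k) = #{t < k | u(t) ≤ 10000}
def uSeq (a : Int) : Nat → Int
  | 0 => a
  | t + 1 => PySem.Int.mod (15091 * uSeq a t) 64007

def cntSeq (a : Int) : Nat → Int
  | 0 => 0
  | t + 1 => cntSeq a t + (if uSeq a t ≤ 10000 then 1 else 0)

theorem uSeq_shift (a : Int) (t0 t : Nat) : uSeq a (t0 + t) = uSeq (uSeq a t0) t := by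
  induction t with
  | zero => rfl
  | succ t ih => simp [uSeq, ih]

theorem cntSeq_shift (a : Int) (t0 t : Nat) :
    cntSeq a (t0 + t) = cntSeq a t0 + cntSeq (uSeq a t0) t := by
  induction t with
  | zero => simp [cntSeq]
  | succ t ih => simp [cntSeq, ih, uSeq_shift]; ring

theorem foldA (a : Int) (l : List Int) : ∀ (j : Nat),
    l.foldl (fun (s : Int × Int) _ =>
      (PySem.Int.mod (15091 * s.1) 64007, if s.1 ≤ 10000 then s.2 + 1 else s.2))
      (uSeq a j, cntSeq a j) = (uSeq a (j + l.length), cntSeq a (j + l.length)) := by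
  induction l with
  | nil => intro j; simp
  | cons hd tl ih =>
      intro j
      have h1 : PySem.Int.mod (15091 * uSeq a j) 64007 = uSeq a (j + 1) := rfl
      have h2 : (if uSeq a j ≤ 10000 then cntSeq a j + 1 else cntSeq a j) = cntSeq a (j + 1) := by
        simp [cntSeq]; split <;> ring
      simp only [List.foldl_cons, h1, h2, ih (j + 1), List.length_cons]
      ring_nf

theorem compte_eq_cnt (a n : Int) : compte a n = cntSeq a n.toNat := by
  have h0 : (a, (0 : Int)) = (uSeq a 0, cntSeq a 0) := rfl
  have hl : (PySem.List.pyRange 0 n 1).length = n.toNat := by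
    rw [PySem.List.length_pyRange_one]; omega
  rw [compte, h0, foldA a _ 0]
  simp [hl]

theorem inner_eq (r : Nat) : ∀ (x cc : Int), compteAltInner r x cc = cc + cntSeq x r := by
  induction r with
  | zero => intro x cc; simp [compteAltInner, cntSeq]
  | succ r ih =>
      intro x cc
      have h : cntSeq x (r + 1) = cntSeq x 1 + cntSeq (uSeq x 1) r := by
        rw [show r + 1 = 1 + r from Nat.add_comm r 1]; exact cntSeq_shift x 1 r
      rw [compteAltInner, ih, h]
      simp only [cntSeq, uSeq, cntSeq]
      split <;> ring

theorem cnt_cycle (b : Int) (P : Nat) (hb : uSeq b P = b) (q r : Nat) :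
    cntSeq b (q * P + r) = q * cntSeq b P + cntSeq b r := by
  induction q with
  | zero => simp
  | succ q ih =>
      have h : (q + 1) * P + r = P + (q * P + r) := by ring
      rw [h, cntSeq_shift, hb, ih]
      push_cast
      ring

theorem loop_correct (a n : Int) : ∀ (m h t : Nat) (power : Int),
    m = n.toNat - h → t ≤ h → h ≤ n.toNat →
    compteAltLoop n (uSeq a h) (cntSeq a h) h (uSeq a t) t (cntSeq a t) power
      = cntSeq a n.toNat := by
  intro m
  induction m with
  | zero =>
      intro h t power hm ht hh
      rw [compteAltLoop]
      have hkn : ¬ ((h : Int) < n) := by omega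
      have hhe : h = n.toNat := by omega
      simp [hhe]
  | succ m ih =>
      intro h t power hm ht hh
      rw [compteAltLoop]
      have hlt : (h : Int) < n := by omega
      simp only [hlt, dif_pos]
      have e1 : PySem.Int.mod (15091 * uSeq a h) 64007 = uSeq a (h + 1) := rfl
      have e2 : (if uSeq a h ≤ 10000 then cntSeq a h + 1 else cntSeq a h) = cntSeq a (h + 1) := by
        simp [cntSeq]; split <;> ring
      have e3 : (h : Int) + 1 = ((h + 1 : Nat) : Int) := by push_cast; ring
      simp only [e1, e2, e3]
      by_cases hanch : ((h + 1 : Nat) : Int) - (t : Int) = power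
      · rw [if_pos hanch]
        exact ih (h + 1) (h + 1) (power * 2) (by omega) le_rfl (by omega)
      · rw [if_neg hanch]
        by_cases hdet : uSeq a (h + 1) = uSeq a t
        · rw [if_pos hdet]
          have hu : uSeq a t = uSeq a (h + 1) := hdet.symm
          have hni : n - (t : Int) = ((n.toNat - t : Nat) : Int) := by omega
          have hki : ((h + 1 : Nat) : Int) - (t : Int) = (((h + 1) - t : Nat) : Int) := by omega
          rw [hki, hni, PySem.Int.floordiv_natCast, PySem.Int.mod_natCast,
            Int.toNat_natCast, inner_eq]
          have hcycle : uSeq (uSeq a t) ((h + 1) - t) = uSeq a t := by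
            rw [← uSeq_shift, show t + ((h + 1) - t) = h + 1 from by omega]
            exact hu.symm
          have hsplitk : cntSeq a (h + 1) = cntSeq a t + cntSeq (uSeq a t) ((h + 1) - t) := by
            have hs := cntSeq_shift a t ((h + 1) - t)
            rw [show t + ((h + 1) - t) = h + 1 from by omega] at hs; exact hs
          have hsplitN : cntSeq a n.toNat = cntSeq a t + cntSeq (uSeq a t) (n.toNat - t) := by
            have hs := cntSeq_shift a t (n.toNat - t)
            rw [show t + (n.toNat - t) = n.toNat from by omega] at hs; exact hs
          have hMdm : n.toNat - t
              = ((n.toNat - t) / ((h + 1) - t)) * ((h + 1) - t) + (n.toNat - t) % ((h + 1) - t) := by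
            rw [Nat.mul_comm]; exact (Nat.div_add_mod _ _).symm
          have hcM : cntSeq (uSeq a t) (n.toNat - t)
              = (((n.toNat - t) / ((h + 1) - t) : Nat) : Int) * cntSeq (uSeq a t) ((h + 1) - t)
                + cntSeq (uSeq a t) ((n.toNat - t) % ((h + 1) - t)) := by
            conv_lhs => rw [hMdm]
            exact cnt_cycle _ _ hcycle _ _
          rw [hsplitN, hcM, hsplitk]
          push_cast
          ring
        · rw [if_neg hdet]
          exact ih (h + 1) t power (by omega) (by omega) (by omega)

theorem compte_alt_eq_cnt (a n : Int) : compte_alt a n = cntSeq a n.toNat := by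
  have h := loop_correct a n n.toNat 0 0 1 (by omega) le_rfl (by omega)
  simpa [compte_alt, uSeq, cntSeq] using h

-- ===== VERDICT (by name: the statement is the Claim_ definition above) =====
theorem compte_spec : Claim_equal_compte := by
  intro alpha n _
  unfold Spec_compte
  rw [compte_eq_cnt, compte_alt_eq_cnt]
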